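-- pv_equiv track=rewrite | github.com/THZdyjy/algorithm-progress | 面试题目汇总/伊对/数组提前.py | front
-- ===== SOURCE A (Python) =====
-- def front(nums, target):
--     n = len(nums)
--     l = 0
--     for i in range(1, n):
--         while i > 0 and nums[i] == target and nums[i] != nums[i-1]:
--             nums[i - 1], nums[i] = nums[i], nums[i-1]
--             i -= 1
--     return nums
-- ===== SOURCE B (Python) =====
-- def front(nums, target):
--     c = nums.count(target)
--     return [target] * c + [x for x in nums if x != target]
-- ===== Notes on version B (the rewrite author's own statement) =====
-- stated objective: simpler
-- what changed: Replaces the index-based bubble-to-front swap loop with a single counting pass: output count(target) copies of target followed by the non-target elements in order.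
import Mathlib
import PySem

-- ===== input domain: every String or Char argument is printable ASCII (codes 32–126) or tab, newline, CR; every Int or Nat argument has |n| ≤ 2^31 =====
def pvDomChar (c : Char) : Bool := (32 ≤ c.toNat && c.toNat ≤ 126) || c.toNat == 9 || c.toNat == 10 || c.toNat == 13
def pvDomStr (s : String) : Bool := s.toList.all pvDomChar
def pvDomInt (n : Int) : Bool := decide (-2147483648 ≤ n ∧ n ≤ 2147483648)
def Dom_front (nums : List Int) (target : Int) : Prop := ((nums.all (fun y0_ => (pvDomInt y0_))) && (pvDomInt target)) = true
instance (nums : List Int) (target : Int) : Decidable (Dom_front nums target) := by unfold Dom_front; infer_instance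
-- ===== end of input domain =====

-- B replaces A's index-based bubble-to-front swap loop by a single counting pass (count targets,
-- then emit them followed by the remaining elements in order) — simpler, not measured faster.
-- A mutates `nums` in place in Python; the equivalence proved here is about the RETURN value only.

-- ===== PORT A =====
-- inner `while` of A: state is the current list, the index i counts down, swapping
-- nums[i-1], nums[i] while nums[i] == target and nums[i] != nums[i-1].
-- Indices i and i-1 are always in range (1 ≤ i < len(nums)), so `List.getD _ _ 0`
-- is exactly Python's nums[i] here (Python would raise only out of range, which never occurs).
def frontWhile (target : Int) : Nat → List Int → List Int
  | 0, nums => nums                                      -- i > 0 fails: loop exits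
  | j + 1, nums =>
    if nums.getD (j + 1) 0 = target ∧ nums.getD (j + 1) 0 ≠ nums.getD j 0 then
      frontWhile target j ((nums.set j (nums.getD (j + 1) 0)).set (j + 1) (nums.getD j 0))
    else nums

-- `for i in range(1, n)` over the mutated list; List.range' 1 (n-1) = [1, …, n-1] = range(1, n).
def front (nums : List Int) (target : Int) : List Int :=
  (List.range' 1 (nums.length - 1)).foldl (fun acc i => frontWhile target i acc) nums

-- ===== PORT B =====
def front_alt (nums : List Int) (target : Int) : List Int :=
  List.replicate (nums.count target) target ++ nums.filter (fun x => x ≠ target)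

-- ===== PRECONDITION & SPEC =====
def Spec_front (nums : List Int) (target : Int) (out : List Int) : Prop := out = front_alt nums target
instance (nums : List Int) (target : Int) (out : List Int) : Decidable (Spec_front nums target out) := by unfold Spec_front; infer_instance

-- ===== CLAIM (what is proved, stated in full; the proofs are below) =====
def Claim_equal_front : Prop := ∀ (nums : List Int) (target : Int), Dom_front nums target → Spec_front nums target (front nums target)

-- ===== LEMMAS AND PROOFS =====

-- the "partitioned" form of a processed prefix
def pvPart (target : Int) (l : List Int) : List Int :=
  List.replicate (l.count target) target ++ l.filter (fun x => x ≠ target)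

lemma pvGetD_append_len {P C : List Int} {x : Int} :
    (P ++ x :: C).getD P.length 0 = x := by
  simp [List.getD_eq_getElem?_getD]

lemma pvBubble (target : Int) (a : Nat) (B C : List Int)
    (hB : ∀ x ∈ B, x ≠ target) :
    frontWhile target (a + B.length) (List.replicate a target ++ (B ++ target :: C))
      = List.replicate a target ++ (target :: (B ++ C)) := by
  induction B using List.reverseRecOn generalizing C with
  | nil =>
    cases a with
    | zero => simp [frontWhile]
    | succ j =>
      have h1 : (List.replicate (j+1) target ++ target :: C).getD (j+1) 0 = target := by
        simpa using pvGetD_append_len (P := List.replicate (j+1) target) (C := C) (x := target)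
      have h2 : (List.replicate (j+1) target ++ target :: C).getD j 0 = target := by
        simp [List.getD_eq_getElem?_getD, List.getElem?_append_left]
      simp only [List.length_nil, Nat.add_zero, List.nil_append]
      rw [frontWhile, if_neg]
      rw [h1, h2]
      simp
  | append_singleton B' b ih =>
    have hb : b ≠ target := hB b (by simp)
    have hB' : ∀ x ∈ B', x ≠ target := fun x hx => hB x (by simp [hx])
    -- set P' = replicate a target ++ B'; the list is P' ++ b :: target :: C
    set P' : List Int := List.replicate a target ++ B' with hP'
    have hlen : a + (B' ++ [b]).length = P'.length + 1 := by simp [hP']; omega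
    have hlist : List.replicate a target ++ ((B' ++ [b]) ++ target :: C)
        = P' ++ b :: target :: C := by simp [hP']
    rw [hlen, hlist]
    have hg1 : (P' ++ b :: target :: C).getD (P'.length + 1) 0 = target := by
      have := pvGetD_append_len (P := P' ++ [b]) (C := C) (x := target)
      simpa using this
    have hg0 : (P' ++ b :: target :: C).getD P'.length 0 = b := pvGetD_append_len
    have hswap : ((P' ++ b :: target :: C).set P'.length target).set (P'.length + 1) b
        = P' ++ target :: b :: C := by
      rw [List.set_append_right _ _ (Nat.le_refl _), List.set_append_right _ _ (by omega)]
      simp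
    have : frontWhile target (P'.length + 1) (P' ++ b :: target :: C)
        = frontWhile target P'.length (P' ++ target :: b :: C) := by
      rw [frontWhile, if_pos ⟨hg1, by rw [hg1, hg0]; exact (Ne.symm hb)⟩, hg1, hg0, hswap]
    rw [this]
    have hlen2 : P'.length = a + B'.length := by simp [hP']
    have hih := ih (b :: C) hB'
    rw [hlen2, hP', List.append_assoc, hih]
    simp

lemma pvStay (target : Int) (j : Nat) (P C : List Int) (x : Int)
    (hP : P.length = j + 1) (hx : x ≠ target) :
    frontWhile target (j + 1) (P ++ x :: C) = P ++ x :: C := by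
  have hg : (P ++ x :: C).getD (j + 1) 0 = x := by
    rw [← hP]; exact pvGetD_append_len
  rw [frontWhile, if_neg]
  rw [hg]
  intro h
  exact hx h.1

lemma pvPart_len (target : Int) (l : List Int) : (pvPart target l).length = l.length := by
  induction l with
  | nil => simp [pvPart]
  | cons x l ih =>
    by_cases h : x = target <;>
      simp_all [pvPart] <;> omega

-- one step of the for loop preserves the invariant
lemma pvStep (target : Int) (l : List Int) (x : Int) (C : List Int) (hl : l ≠ []) :
    frontWhile target l.length (pvPart target l ++ x :: C)
      = pvPart target (l ++ [x]) ++ C := by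
  by_cases hx : x = target
  · rw [hx]
    have hB : ∀ y ∈ l.filter (fun x => x ≠ target), y ≠ target := by
      intro y hy; simpa using (List.mem_filter.mp hy).2
    have hlen : l.length = l.count target + (l.filter (fun x => x ≠ target)).length := by
      have := pvPart_len target l
      simp only [pvPart, List.length_append, List.length_replicate] at this
      omega
    rw [pvPart, List.append_assoc, hlen,
      pvBubble target (l.count target) (l.filter (fun x => x ≠ target)) C hB]
    simp [pvPart, List.count_append, List.filter_append, List.replicate_succ',
      List.append_assoc]
  · obtain ⟨j, hj⟩ : ∃ j, l.length = j + 1 :=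
      ⟨l.length - 1, by cases l <;> simp_all⟩
    rw [hj, pvStay target j (pvPart target l) C x (by rw [pvPart_len]; exact hj) hx]
    simp [pvPart, List.count_append, List.filter_append, hx]

lemma pvInv (target : Int) (nums : List Int) (m : Nat) (hm : m + 1 ≤ nums.length) :
    (List.range' 1 m).foldl (fun acc i => frontWhile target i acc) nums
      = pvPart target (nums.take (m + 1)) ++ nums.drop (m + 1) := by
  induction m with
  | zero =>
    obtain ⟨x, rest, rfl⟩ : ∃ x rest, nums = x :: rest := by
      cases nums with
      | nil => simp at hm
      | cons x rest => exact ⟨x, rest, rfl⟩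
    by_cases h : x = target <;> simp [pvPart, h]
  | succ m ih =>
    rw [List.range'_1_concat, List.foldl_append, ih (by omega)]
    have htake : nums.take (m + 1) ≠ [] := by
      have : (nums.take (m + 1)).length = m + 1 := List.length_take_of_le (by omega)
      intro h; rw [h] at this; simp at this
    obtain ⟨x, hx⟩ : ∃ x, nums.drop (m + 1) = x :: nums.drop (m + 2) := by
      have h1 : m + 1 < nums.length := by omega
      refine ⟨nums[m+1], ?_⟩
      rw [List.drop_eq_getElem_cons h1]
    have hlen : (nums.take (m + 1)).length = m + 1 := List.length_take_of_le (by omega)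
    simp only [List.foldl_cons, List.foldl_nil, hx]
    have h1 : m + 1 < nums.length := by omega
    have h1m : 1 + m = (List.take (m + 1) nums).length := by rw [hlen]; omega
    rw [h1m, pvStep target (nums.take (m + 1)) x (nums.drop (m + 2)) htake]
    have hget : nums[m+1] = x := by
      have h2 := List.drop_eq_getElem_cons (l := nums) h1
      rw [h2] at hx
      exact (List.cons.injEq _ _ _ _ ▸ hx).1
    have htx : nums.take (m + 1) ++ [x] = nums.take (m + 2) := by
      conv_rhs => rw [List.take_add_one]
      rw [List.getElem?_eq_getElem h1, hget]
      rfl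
    rw [htx]

-- ===== VERDICT (by name: the statement is the Claim_ definition above) =====
theorem front_spec : Claim_equal_front := by
  intro nums target _
  show front nums target = front_alt nums target
  cases hn : nums with
  | nil => simp [front, front_alt]
  | cons y rest =>
    have hlen : nums.length - 1 + 1 ≤ nums.length := by simp [hn]
    have := pvInv target nums (nums.length - 1) hlen
    have hm1 : nums.length - 1 + 1 = nums.length := by simp [hn]
    rw [hm1] at this
    simp only [List.take_length, List.drop_length, List.append_nil] at this
    rw [← hn]
    simpa [front, front_alt, pvPart] using this
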